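-- pv_equiv track=rewrite | github.com/MRCRABS033/Learn-English-Terminal | Services/analysis/sentence_analyzer.py | _linker_clause_break_indices
-- ===== SOURCE A (Python) =====
-- def _linker_clause_break_indices(tokens: list[str]) -> list[int]:
--     indices: list[int] = []
--     single_linkers = {
--         "if",
--         "when",
--         "because",
--         "although",
--         "though",
--         "that",
--         "who",
--         "which",
--         "whose",
--         "whom",
--         "despite",
--         "unless",
--         "whether",
--         "while",
--     }
--     for i, token in enumerate(tokens):
--         if token in single_linkers:
--             indices.append(i)
--     for seq in (["as", "long", "as"], ["provided", "that"], ["not", "only"]):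
--         for i in range(len(tokens) - len(seq) + 1):
--             if tokens[i : i + len(seq)] == seq:
--                 indices.append(i)
--     return indices
-- ===== SOURCE B (Python) =====
-- def _linker_clause_break_indices(tokens: list[str]) -> list[int]:
--     # Inverted index: token -> ascending list of its positions, built once.
--     positions: dict[str, list[int]] = {}
--     for i, t in enumerate(tokens):
--         positions.setdefault(t, []).append(i)
--     single_linkers = (
--         "if", "when", "because", "although", "though", "that", "who",
--         "which", "whose", "whom", "despite", "unless", "whether", "while",
--     )
--     # Single-word hits: merge the (disjoint) position lists of the linker
--     # words; sorting restores the original left-to-right index order.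
--     out = sorted(j for w in single_linkers for j in positions.get(w, []))
--     n = len(tokens)
--     # Phrase hits: candidates come from the index of the phrase's first
--     # word; only the remaining words are checked, by direct indexing.
--     for phrase in (["as", "long", "as"], ["provided", "that"], ["not", "only"]):
--         k = len(phrase)
--         for i in positions.get(phrase[0], []):
--             if i + k <= n and all(tokens[i + j] == phrase[j] for j in range(1, k)):
--                 out.append(i)
--     return out
-- ===== Notes on version B (the rewrite author's own statement) =====
-- stated objective: alternative
-- what changed: A scans the token list four times, testing each token against a set and comparing a slice at every window position for each phrase; B builds an inverted index (token -> ascending position list) once, obtains the single-word hits by merging the linker words' position lists with sorted(), and finds phrase hits by checking only the candidate positions of each phrase's first word taken from the index.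
import Mathlib
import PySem

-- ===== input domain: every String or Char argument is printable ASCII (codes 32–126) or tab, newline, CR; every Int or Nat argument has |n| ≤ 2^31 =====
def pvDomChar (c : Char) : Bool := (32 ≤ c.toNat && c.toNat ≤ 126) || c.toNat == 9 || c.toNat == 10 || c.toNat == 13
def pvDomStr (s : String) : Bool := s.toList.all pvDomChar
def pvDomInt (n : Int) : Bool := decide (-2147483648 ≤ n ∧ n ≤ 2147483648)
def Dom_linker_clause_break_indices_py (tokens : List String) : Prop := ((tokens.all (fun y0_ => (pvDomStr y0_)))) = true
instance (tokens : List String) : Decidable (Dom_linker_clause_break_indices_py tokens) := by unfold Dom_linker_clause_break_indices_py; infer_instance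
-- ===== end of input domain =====

-- B replaces A's four scans (set test per token + slice comparison per window per phrase) by an
-- inverted index token -> positions built once: singles by merging the linker words' position
-- lists with sorted(), phrase hits by checking only candidates from the first word's positions.

-- ===== PORT A =====
def pvSinglesA : PySem.Set String := PySem.Set.ofList
  ["if", "when", "because", "although", "though", "that", "who",
   "which", "whose", "whom", "despite", "unless", "whether", "while"]

def pvSeqsA : List (List String) := [["as", "long", "as"], ["provided", "that"], ["not", "only"]]

def linker_clause_break_indices_py (tokens : List String) : List Int :=
  let indices : List Int :=
    (PySem.List.enumerate tokens 0).foldl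
      (fun acc p => if PySem.Set.contains pvSinglesA p.2 then acc ++ [p.1] else acc) []
  pvSeqsA.foldl
    (fun acc seq =>
      (PySem.List.pyRange 0 ((tokens.length : Int) - (seq.length : Int) + 1) 1).foldl
        (fun a i =>
          if PySem.List.slice tokens (some i) (some (i + (seq.length : Int))) == seq then a ++ [i]
          else a)
        acc)
    indices

-- ===== PORT B =====
def pvWordsB : List String :=
  ["if", "when", "because", "although", "though", "that", "who",
   "which", "whose", "whom", "despite", "unless", "whether", "while"]

def pvSeqsB : List (List String) := [["as", "long", "as"], ["provided", "that"], ["not", "only"]]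

-- 'i + k <= n and all(tokens[i + j] == phrase[j] for j in range(1, k))'
def pvCondB (tokens : List String) (ph : List String) (i : Int) : Bool :=
  decide (i + (ph.length : Int) ≤ (tokens.length : Int)) &&
  (PySem.List.pyRange 1 (ph.length : Int) 1).all
    (fun j => PySem.List.pyGet? tokens (i + j) == PySem.List.pyGet? ph j)

def linker_clause_break_indices_py_alt (tokens : List String) : List Int :=
  let positions : PySem.Dict String (List Int) :=
    (PySem.List.enumerate tokens 0).foldl
      (fun d p => d.modify p.2 [] (· ++ [p.1])) PySem.Dict.empty
  let out : List Int :=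
    PySem.List.sorted (pvWordsB.flatMap (fun w => positions.getD w [])) (fun x => x) false
  pvSeqsB.foldl
    (fun out ph =>
      (positions.getD (ph.headD "") []).foldl
        (fun o i => if pvCondB tokens ph i then o ++ [i] else o) out)
    out

-- ===== PRECONDITION & SPEC =====
def Spec_linker_clause_break_indices_py (tokens : List String) (out : List Int) : Prop := out = linker_clause_break_indices_py_alt tokens
instance (tokens : List String) (out : List Int) : Decidable (Spec_linker_clause_break_indices_py tokens out) := by unfold Spec_linker_clause_break_indices_py; infer_instance

-- ===== CLAIM (what is proved, stated in full; the proofs are below) =====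
def Claim_equal_linker_clause_break_indices_py : Prop := ∀ (tokens : List String), Dom_linker_clause_break_indices_py tokens → Spec_linker_clause_break_indices_py tokens (linker_clause_break_indices_py tokens)

-- ===== LEMMAS AND PROOFS =====

-- the singles list of A's first loop, written as a stand-alone recursion
def pvSings : List String → Int → List Int
  | [], _ => []
  | t :: r, i => (if PySem.Set.contains pvSinglesA t then [i] else []) ++ pvSings r (i + 1)

-- the hit list of one phrase in A's scan, written as a stand-alone recursion
def pvHits (seq : List String) : List String → Int → List Int
  | [], _ => []
  | t :: r, i => (if (t :: r).take seq.length == seq then [i] else []) ++ pvHits seq r (i + 1)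

theorem pvHits_short (seq : List String) (toks : List String) : ∀ (i : Int),
    toks.length < seq.length → pvHits seq toks i = [] := by
  induction toks with
  | nil => intro i _; rfl
  | cons t r ih =>
    intro i h
    simp only [List.length_cons] at h
    have hne : ((t :: r).take seq.length == seq) = false := by
      apply beq_eq_false_iff_ne.mpr
      intro he
      have h2 := congrArg List.length he
      rw [List.length_take, List.length_cons] at h2
      omega
    simp only [pvHits, hne]
    simpa using ih (i + 1) (by omega)

theorem pv_map_filter_eq_filterMap {α β : Type} (p : α → Bool) (f : α → β) :
    ∀ l : List α, (l.filter p).map f = l.filterMap (fun a => if p a then some (f a) else none) := by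
  intro l
  induction l with
  | nil => rfl
  | cons x xs ih =>
    by_cases h : p x = true <;> simp [h, ih]

theorem pvKey (seq : List String) (hs : seq ≠ []) (toks : List String) : ∀ (i0 : Int),
    ((List.range (((toks.length : Int) - (seq.length : Int) + 1).toNat)).filterMap
      (fun j => if (toks.drop j).take seq.length == seq then some (i0 + (j : Int)) else none))
    = pvHits seq toks i0 := by
  have hk : 1 ≤ seq.length := by
    cases seq with
    | nil => exact absurd rfl hs
    | cons a b => simp
  induction toks with
  | nil =>
    intro i0
    have h0 : (((([] : List String).length : Int) - (seq.length : Int) + 1).toNat) = 0 := by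
      simp; omega
    rw [h0]
    simp [pvHits]
  | cons t r ih =>
    intro i0
    by_cases hlen : seq.length ≤ r.length + 1
    · have hm : ((((t :: r).length : Int) - (seq.length : Int) + 1).toNat)
          = (((r.length : Int) - (seq.length : Int) + 1).toNat) + 1 := by
        simp; omega
      rw [hm, List.range_succ_eq_map]
      rw [List.filterMap_cons, List.filterMap_map]
      have hfun : ((fun j => if ((t :: r).drop j).take seq.length == seq
              then some (i0 + (j : Int)) else none) ∘ Nat.succ)
          = (fun j => if (r.drop j).take seq.length == seq
              then some ((i0 + 1) + (j : Int)) else none) := by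
        funext j
        simp only [Function.comp, List.drop_succ_cons]
        have : i0 + ((Nat.succ j : Nat) : Int) = (i0 + 1) + (j : Int) := by push_cast; ring
        rw [this]
        rfl
      rw [hfun, ih (i0 + 1)]
      simp only [List.drop_zero, Nat.cast_zero, add_zero]
      by_cases hh : ((t :: r).take seq.length == seq) = true <;>
        simp [pvHits, hh]
    · have hm : ((((t :: r).length : Int) - (seq.length : Int) + 1).toNat) = 0 := by
        simp; omega
      rw [hm]
      have : pvHits seq (t :: r) i0 = [] := by
        apply pvHits_short
        simp; omega
      simp [this]

theorem pvSingsA_fold (toks : List String) : ∀ (s : Int) (acc : List Int),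
    (PySem.List.enumerate toks s).foldl
      (fun acc p => if PySem.Set.contains pvSinglesA p.2 then acc ++ [p.1] else acc) acc
    = acc ++ pvSings toks s := by
  induction toks with
  | nil => intro s acc; simp [PySem.List.enumerate_nil, pvSings]
  | cons t r ih =>
    intro s acc
    rw [PySem.List.enumerate_cons]
    simp only [List.foldl_cons, pvSings]
    by_cases h : PySem.Set.contains pvSinglesA t = true
    · rw [if_pos h, if_pos h, ih, List.append_assoc]
    · rw [if_neg h, if_neg h, ih]
      rfl

theorem pvPhrase_fold (seq : List String) (hs : seq ≠ []) (toks : List String) (acc : List Int) :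
    (PySem.List.pyRange 0 ((toks.length : Int) - (seq.length : Int) + 1) 1).foldl
      (fun a i =>
        if PySem.List.slice toks (some i) (some (i + (seq.length : Int))) == seq then a ++ [i]
        else a)
      acc
    = acc ++ pvHits seq toks 0 := by
  rw [PySem.List.foldl_append_if_eq_filter
    (p := fun i => PySem.List.slice toks (some i) (some (i + (seq.length : Int))) == seq)]
  congr 1
  rw [PySem.List.pyRange_one]
  rw [List.filter_map]
  rw [pv_map_filter_eq_filterMap]
  have hfun : (fun (a : Nat) =>
        if ((fun i => PySem.List.slice toks (some i) (some (i + (seq.length : Int))) == seq) ∘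
              (fun k : Nat => (0 : Int) + (k : Int))) a = true
        then some ((0 : Int) + (a : Int)) else none)
      = (fun (j : Nat) => if (toks.drop j).take seq.length == seq
          then some ((j : Int)) else none) := by
    funext j
    simp [Function.comp, zero_add, PySem.List.slice_natCast_add]
  rw [hfun]
  rw [show ((toks.length : Int) - (seq.length : Int) + 1 - 0)
      = ((toks.length : Int) - (seq.length : Int) + 1) from by ring]
  have hkey := pvKey seq hs toks 0
  simp only [zero_add] at hkey
  exact hkey

-- ===== B-side lemmas =====

-- the inverted index read back: positions[w] is the ascending list of w's indices
theorem pvPos_getD (tokens : List String) (w : String) :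
    (((PySem.List.enumerate tokens 0).foldl
      (fun d p => d.modify p.2 [] (· ++ [p.1])) PySem.Dict.empty).getD w [])
    = ((PySem.List.enumerate tokens 0).filter (fun p => p.2 == w)).map (·.1) := by
  have h := PySem.Dict.getD_foldl_modify_append
    (l := (PySem.List.enumerate tokens 0).map (fun p => (p.2, p.1)))
    (d := (PySem.Dict.empty : PySem.Dict String (List Int))) (c := w)
  rw [List.foldl_map] at h
  simp only [List.filter_map, List.map_map] at h
  simpa using h

-- A's singles recursion as a filter over enumerate
theorem pvSings_enum (toks : List String) : ∀ (i : Int),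
    pvSings toks i
      = ((PySem.List.enumerate toks i).filter
          (fun p => PySem.Set.contains pvSinglesA p.2)).map (·.1) := by
  induction toks with
  | nil => intro i; simp [pvSings, PySem.List.enumerate_nil]
  | cons t r ih =>
    intro i
    rw [PySem.List.enumerate_cons]
    by_cases h : t ∈ pvSinglesA <;>
      simp [pvSings, PySem.Set.contains, h, ih]

-- concatenating two disjoint filters is a permutation of the disjunctive filter
theorem pv_filter_or_perm {α : Type} (p q : α → Bool) (h : ∀ x, ¬(p x = true ∧ q x = true)) :
    ∀ l : List α, (l.filter p ++ l.filter q).Perm (l.filter (fun x => p x || q x)) := by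
  intro l
  induction l with
  | nil => simp
  | cons x xs ih =>
    rcases Bool.eq_false_or_eq_true (p x) with hp | hp
    · have hq : q x = false := by
        by_contra hq'
        exact h x ⟨hp, by simpa using hq'⟩
      simp only [List.filter_cons, hp, hq, Bool.false_eq_true, if_false, if_true,
        Bool.true_or, List.cons_append]
      exact ih.cons x
    · rcases Bool.eq_false_or_eq_true (q x) with hq | hq
      · simp only [List.filter_cons, hp, hq, Bool.false_eq_true, if_false, if_true,
          Bool.false_or]
        exact List.perm_middle.trans (ih.cons x)
      · simpa [List.filter_cons, hp, hq] using ih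

-- merging the per-word index lists is a permutation of the membership filter
theorem pvFlat_perm (E : List (Int × String)) : ∀ (ws : List String), ws.Nodup →
    (ws.flatMap (fun w => (E.filter (fun p => p.2 == w)).map (·.1))).Perm
      ((E.filter (fun p => ws.contains p.2)).map (·.1)) := by
  intro ws
  induction ws with
  | nil => simp
  | cons w ws ih =>
    intro hnd
    rcases List.nodup_cons.mp hnd with ⟨hw, hnd'⟩
    rw [List.flatMap_cons]
    refine ((ih hnd').append_left _).trans ?_
    rw [← List.map_append]
    refine List.Perm.map _ ?_
    refine (pv_filter_or_perm _ _ ?_ E).trans ?_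
    · intro x hx
      rcases hx with ⟨h1, h2⟩
      have e1 : x.2 = w := by simpa using h1
      have e2 : x.2 ∈ ws := by simpa using h2
      exact hw (e1 ▸ e2)
    · apply List.Perm.of_eq
      apply List.filter_congr
      intro p _
      rw [Bool.eq_iff_iff]
      simp only [Bool.or_eq_true, beq_iff_eq, List.contains_iff_mem, List.mem_cons]

-- indices extracted from enumerate are strictly increasing
theorem pvPairwise_filter_map (toks : List String) (s : Int) (f : Int × String → Bool) :
    (((PySem.List.enumerate toks s).filter f).map (·.1)).Pairwise (· < ·) := by
  exact ((PySem.List.pairwise_lt_enumerate toks s).filter f).map _ (fun _ _ h => h)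

-- B's sorted merge equals A's singles scan
theorem pvSinglesB_eq (tokens : List String) :
    PySem.List.sorted
      (pvWordsB.flatMap (fun w =>
        ((PySem.List.enumerate tokens 0).filter (fun p => p.2 == w)).map (·.1)))
      (fun x => x) false
    = pvSings tokens 0 := by
  apply PySem.List.sorted_eq_of_perm_of_pairwise_lt
  · rw [pvSings_enum]
    rw [List.filter_congr (fun (p : Int × String) _ => show
        PySem.Set.contains pvSinglesA p.2 = pvWordsB.contains p.2 by
      rw [Bool.eq_iff_iff]
      simp [PySem.Set.contains,
        show (pvSinglesA : List String) = pvWordsB from rfl])]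
    exact (pvFlat_perm (PySem.List.enumerate tokens 0) pvWordsB (by decide)).symm
  · rw [pvSings_enum]
    exact pvPairwise_filter_map tokens 0 _

-- generic suffix induction: filtering the first word's index list by the rest-check
-- reproduces A's window recursion pvHits
theorem pvHitsB (tokens : List String) (s0 : String) (seq : List String) (cond : Int → Bool)
    (hc : ∀ (d : Nat) (t : String) (r : List String), tokens.drop d = t :: r →
        ((t == s0) && cond (d : Int)) = ((t :: r).take seq.length == seq)) :
    ∀ (suf : List String) (d : Nat), tokens.drop d = suf →
      ((((PySem.List.enumerate suf (d : Int)).filter (fun p => p.2 == s0)).map (·.1)).filter cond)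
        = pvHits seq suf (d : Int) := by
  intro suf
  induction suf with
  | nil => intro d _; simp [PySem.List.enumerate_nil, pvHits]
  | cons t r ih =>
    intro d hd
    have hr : tokens.drop (d + 1) = r := by
      rw [← List.tail_drop, hd]
      rfl
    have hih := ih (d + 1) hr
    have hck := hc d t r hd
    have hcast : ((d : Int) + 1) = ((d + 1 : Nat) : Int) := by push_cast; ring
    rw [PySem.List.enumerate_cons, hcast]
    simp only [pvHits, ← hck]
    by_cases h1 : (t == s0) = true
    · simp only [List.filter_cons, h1, if_true, List.map_cons, Bool.true_and, hcast, hih]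
      split <;> simp
    · have h1' : (t == s0) = false := by simpa using h1
      simp only [List.filter_cons, h1', Bool.false_eq_true, if_false, Bool.false_and,
        List.nil_append, hcast, hih]

theorem pvCond_as (tokens : List String) :
    ∀ (d : Nat) (t : String) (r : List String), tokens.drop d = t :: r →
      ((t == "as") && pvCondB tokens ["as", "long", "as"] (d : Int))
        = ((t :: r).take ([("as" : String), "long", "as"].length) == ["as", "long", "as"]) := by
  intro d t r hd
  have hlen : tokens.length = d + (r.length + 1) := by
    have h := congrArg List.length hd
    simp [List.length_drop] at h
    omega
  have hrange : PySem.List.pyRange 1 (3 : Int) 1 = [(1 : Int), 2] := by decide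
  have hg : ∀ j : Nat, PySem.List.pyGet? tokens ((d : Int) + (j : Int)) = (t :: r)[j]? := by
    intro j
    rw [show ((d : Int) + (j : Int)) = (((d + j : Nat) : Int)) from by push_cast; ring]
    rw [PySem.List.pyGet?_natCast]
    rw [← List.getElem?_drop, hd]
  rw [Bool.eq_iff_iff]
  simp only [pvCondB, show ([("as" : String), "long", "as"].length) = 3 from rfl,
    Nat.cast_ofNat, hrange, List.all_cons, List.all_nil, Bool.and_eq_true, decide_eq_true_eq]
  rw [show ((d : Int) + (1 : Int)) = ((d : Int) + ((1 : Nat) : Int)) from by norm_num,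
    show ((d : Int) + (2 : Int)) = ((d : Int) + ((2 : Nat) : Int)) from by norm_num]
  rw [hg 1, hg 2]
  match r with
  | [] => simp
  | [b] => simp
  | b :: c :: r' =>
    simp [hlen]
    intro _ _ _
    omega

theorem pvCond_provided (tokens : List String) :
    ∀ (d : Nat) (t : String) (r : List String), tokens.drop d = t :: r →
      ((t == "provided") && pvCondB tokens ["provided", "that"] (d : Int))
        = ((t :: r).take ([("provided" : String), "that"].length) == ["provided", "that"]) := by
  intro d t r hd
  have hlen : tokens.length = d + (r.length + 1) := by
    have h := congrArg List.length hd
    simp [List.length_drop] at h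
    omega
  have hrange : PySem.List.pyRange 1 (2 : Int) 1 = [(1 : Int)] := by decide
  have hg : ∀ j : Nat, PySem.List.pyGet? tokens ((d : Int) + (j : Int)) = (t :: r)[j]? := by
    intro j
    rw [show ((d : Int) + (j : Int)) = (((d + j : Nat) : Int)) from by push_cast; ring]
    rw [PySem.List.pyGet?_natCast]
    rw [← List.getElem?_drop, hd]
  rw [Bool.eq_iff_iff]
  simp only [pvCondB, show ([("provided" : String), "that"].length) = 2 from rfl,
    Nat.cast_ofNat, hrange, List.all_cons, List.all_nil, Bool.and_eq_true, decide_eq_true_eq]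
  rw [show ((d : Int) + (1 : Int)) = ((d : Int) + ((1 : Nat) : Int)) from by norm_num]
  rw [hg 1]
  match r with
  | [] => simp
  | b :: r' =>
    simp [hlen]
    intro _ _
    omega

theorem pvCond_not (tokens : List String) :
    ∀ (d : Nat) (t : String) (r : List String), tokens.drop d = t :: r →
      ((t == "not") && pvCondB tokens ["not", "only"] (d : Int))
        = ((t :: r).take ([("not" : String), "only"].length) == ["not", "only"]) := by
  intro d t r hd
  have hlen : tokens.length = d + (r.length + 1) := by
    have h := congrArg List.length hd
    simp [List.length_drop] at h
    omega
  have hrange : PySem.List.pyRange 1 (2 : Int) 1 = [(1 : Int)] := by decide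
  have hg : ∀ j : Nat, PySem.List.pyGet? tokens ((d : Int) + (j : Int)) = (t :: r)[j]? := by
    intro j
    rw [show ((d : Int) + (j : Int)) = (((d + j : Nat) : Int)) from by push_cast; ring]
    rw [PySem.List.pyGet?_natCast]
    rw [← List.getElem?_drop, hd]
  rw [Bool.eq_iff_iff]
  simp only [pvCondB, show ([("not" : String), "only"].length) = 2 from rfl,
    Nat.cast_ofNat, hrange, List.all_cons, List.all_nil, Bool.and_eq_true, decide_eq_true_eq]
  rw [show ((d : Int) + (1 : Int)) = ((d : Int) + ((1 : Nat) : Int)) from by norm_num]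
  rw [hg 1]
  match r with
  | [] => simp
  | b :: r' =>
    simp [hlen]
    intro _ _
    omega

-- ===== VERDICT (by name: the statement is the Claim_ definition above) =====
theorem linker_clause_break_indices_py_spec : Claim_equal_linker_clause_break_indices_py := by
  intro tokens _
  unfold Spec_linker_clause_break_indices_py
  unfold linker_clause_break_indices_py linker_clause_break_indices_py_alt
  simp only [pvSeqsA, pvSeqsB, List.foldl]
  rw [pvSingsA_fold tokens 0 []]
  rw [pvPhrase_fold (["as", "long", "as"] : List String) (by simp) tokens]
  rw [pvPhrase_fold (["provided", "that"] : List String) (by simp) tokens]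
  rw [pvPhrase_fold (["not", "only"] : List String) (by simp) tokens]
  -- B side
  simp only [pvPos_getD, List.headD_cons]
  rw [pvSinglesB_eq tokens]
  rw [PySem.List.foldl_append_if_eq_filter, PySem.List.foldl_append_if_eq_filter,
    PySem.List.foldl_append_if_eq_filter]
  have hA := pvHitsB tokens "as" ["as", "long", "as"]
    (pvCondB tokens ["as", "long", "as"]) (pvCond_as tokens) tokens 0 List.drop_zero
  have hP := pvHitsB tokens "provided" ["provided", "that"]
    (pvCondB tokens ["provided", "that"]) (pvCond_provided tokens) tokens 0 List.drop_zero
  have hN := pvHitsB tokens "not" ["not", "only"]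
    (pvCondB tokens ["not", "only"]) (pvCond_not tokens) tokens 0 List.drop_zero
  simp only [Nat.cast_zero] at hA hP hN
  rw [hA, hP, hN]
  simp [List.append_assoc]
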